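-- pv_equiv track=rewrite | github.com/MuhammadMehdiRaza/AI_Semester_Project | AI_Project/data/augmented/plagiarized_25.py | ft_v4
-- ===== SOURCE A (Python) =====
-- def factorial_v1(x):
--     res = 1
--     for j in range(2, x + 1):
--         res *= j
--     return res
--
-- def ft_v4(n):
--     ttl_v4 = 0
--     for i in range(1, n + 1):
--         if i % 2 == 0:
--             ttl_v4 += factorial_v1(i)
--         else:
--             ttl_v4 += i
--     return ttl_v4
-- ===== SOURCE B (Python) =====
-- def ft_v4(n):
--     # odd contributions in closed form; factorial maintained incrementally (no inner loop)
--     total = ((max(n, 0) + 1) // 2) ** 2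
--     fact = 1
--     for i in range(1, n + 1):
--         fact *= i
--         if i % 2 == 0:
--             total += fact
--     return total
-- ===== Notes on version B (the rewrite author's own statement) =====
-- stated objective: faster
-- what changed: B removes the inner factorial loop by maintaining a running factorial across the single pass and replaces the odd-term summation by the closed form ((n+1)//2)**2.
import Mathlib
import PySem

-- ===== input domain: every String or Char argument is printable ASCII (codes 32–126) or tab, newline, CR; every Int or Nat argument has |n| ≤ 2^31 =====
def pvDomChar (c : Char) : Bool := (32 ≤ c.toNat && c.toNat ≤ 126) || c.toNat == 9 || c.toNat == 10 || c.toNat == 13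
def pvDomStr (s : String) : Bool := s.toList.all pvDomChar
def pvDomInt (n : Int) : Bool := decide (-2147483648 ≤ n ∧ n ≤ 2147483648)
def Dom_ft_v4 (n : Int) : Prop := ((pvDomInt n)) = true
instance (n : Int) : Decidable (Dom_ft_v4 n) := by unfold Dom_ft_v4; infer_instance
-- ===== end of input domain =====

-- B replaces A's inner factorial loop by a running factorial and the odd-index sum by its
-- closed form ((n+1)//2)^2: O(n) multiplications instead of O(n^2) loop iterations.

-- ===== PORT A =====
def factorial_v1 (x : Int) : Int :=
  (PySem.List.pyRange 2 (x + 1) 1).foldl (fun res j => res * j) 1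

def ft_v4 (n : Int) : Int :=
  (PySem.List.pyRange 1 (n + 1) 1).foldl
    (fun ttl i => if PySem.Int.mod i 2 = 0 then ttl + factorial_v1 i else ttl + i) 0

-- ===== PORT B =====
def ft_v4_alt (n : Int) : Int :=
  let total0 : Int := (PySem.Int.floordiv (max n 0 + 1) 2) ^ 2
  let st := (PySem.List.pyRange 1 (n + 1) 1).foldl
    (fun (st : Int × Int) i =>
      let fact := st.1 * i
      (fact, if PySem.Int.mod i 2 = 0 then st.2 + fact else st.2))
    (1, total0)
  st.2

-- ===== PRECONDITION & SPEC =====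
def Spec_ft_v4 (n : Int) (out : Int) : Prop := out = ft_v4_alt n
instance (n : Int) (out : Int) : Decidable (Spec_ft_v4 n out) := by unfold Spec_ft_v4; infer_instance

-- ===== CLAIM (what is proved, stated in full; the proofs are below) =====
def Claim_equal_ft_v4 : Prop := ∀ (n : Int), Dom_ft_v4 n → Spec_ft_v4 n (ft_v4 n)

-- ===== LEMMAS AND PROOFS =====

-- Nat-level reference functions
def factN : Nat → Int
  | 0 => 1
  | m + 1 => factN m * ((m : Int) + 1)

def evS : Nat → Int
  | 0 => 0
  | m + 1 => evS m + (if (m + 1) % 2 = 0 then factN (m + 1) else 0)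

def odS : Nat → Int
  | 0 => 0
  | m + 1 => odS m + (if (m + 1) % 2 = 0 then 0 else ((m : Int) + 1))

lemma pymod_natCast_two (m : Nat) : PySem.Int.mod (m : Int) 2 = ((m % 2 : Nat) : Int) := by
  simp [PySem.Int.mod, Int.fmod_eq_emod]

lemma fact_eq (m : Nat) : factorial_v1 (m : Int) = factN m := by
  induction m with
  | zero => decide
  | succ k ih =>
    cases k with
    | zero => decide
    | succ j =>
      have h : (2 : Int) ≤ (j : Int) + 1 + 1 := by omega
      have hr : PySem.List.pyRange 2 (((j + 1 + 1 : Nat) : Int) + 1) 1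
          = PySem.List.pyRange 2 (((j + 1 : Nat) : Int) + 1) 1 ++ [((j + 1 + 1 : Nat) : Int)] := by
        push_cast
        rw [show (j : Int) + 1 + 1 + 1 = ((j : Int) + 1 + 1) + 1 by ring,
          PySem.List.pyRange_one_succ_right h]
      unfold factorial_v1
      rw [hr, List.foldl_append]
      have := ih
      unfold factorial_v1 at this
      simp only [List.foldl_cons, List.foldl_nil, this]
      simp only [factN]
      push_cast
      ring

lemma A_eq (m : Nat) : ft_v4 (m : Int) = odS m + evS m := by
  induction m with
  | zero => decide
  | succ k ih =>
    have h : (1 : Int) ≤ (k : Int) + 1 := by omega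
    have hr : PySem.List.pyRange 1 (((k + 1 : Nat) : Int) + 1) 1
        = PySem.List.pyRange 1 (((k : Nat) : Int) + 1) 1 ++ [((k + 1 : Nat) : Int)] := by
      push_cast
      rw [PySem.List.pyRange_one_succ_right h]
    unfold ft_v4
    rw [hr, List.foldl_append]
    unfold ft_v4 at ih
    rw [ih]
    simp only [List.foldl_cons, List.foldl_nil, pymod_natCast_two, fact_eq]
    have hev : evS (k + 1) = evS k + (if (k + 1) % 2 = 0 then factN (k + 1) else 0) := rfl
    have hod : odS (k + 1) = odS k + (if (k + 1) % 2 = 0 then 0 else ((k : Int) + 1)) := rfl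
    rw [hev, hod]
    rcases Nat.mod_two_eq_zero_or_one (k + 1) with hp | hp
    · rw [hp]
      norm_num
      ring
    · rw [hp]
      norm_num
      ring

lemma B_fold (m : Nat) (t : Int) :
    (PySem.List.pyRange 1 ((m : Int) + 1) 1).foldl
      (fun (st : Int × Int) i =>
        (st.1 * i, if PySem.Int.mod i 2 = 0 then st.2 + st.1 * i else st.2))
      (1, t) = (factN m, t + evS m) := by
  induction m with
  | zero => simp [PySem.List.pyRange_one_eq_nil (by norm_num : (1:Int) ≤ 1), factN, evS]
  | succ k ih =>
    have h : (1 : Int) ≤ (k : Int) + 1 := by omega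
    have hr : PySem.List.pyRange 1 (((k + 1 : Nat) : Int) + 1) 1
        = PySem.List.pyRange 1 (((k : Nat) : Int) + 1) 1 ++ [((k + 1 : Nat) : Int)] := by
      push_cast
      rw [PySem.List.pyRange_one_succ_right h]
    rw [hr, List.foldl_append, ih]
    simp only [List.foldl_cons, List.foldl_nil, pymod_natCast_two]
    have hev : evS (k + 1) = evS k + (if (k + 1) % 2 = 0 then factN (k + 1) else 0) := rfl
    have hfa : factN (k + 1) = factN k * ((k : Int) + 1) := rfl
    rw [hev, hfa]
    rcases Nat.mod_two_eq_zero_or_one (k + 1) with hp | hp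
    · rw [hp]
      norm_num [Prod.ext_iff]
      ring
    · rw [hp]
      norm_num [Prod.ext_iff]

lemma od_closed (m : Nat) : odS m = (((m + 1) / 2 : Nat) : Int) ^ 2 := by
  induction m with
  | zero => decide
  | succ k ih =>
    have hod : odS (k + 1) = odS k + (if (k + 1) % 2 = 0 then 0 else ((k : Int) + 1)) := rfl
    rw [hod, ih]
    rcases Nat.even_or_odd k with ⟨a, ha⟩ | ⟨a, ha⟩
    · -- k = 2a, k+1 odd
      subst ha
      have hp : ¬ ((a + a + 1) % 2 = 0) := by omega
      have h1 : (a + a + 1) / 2 = a := by omega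
      have h2 : (a + a + 1 + 1) / 2 = a + 1 := by omega
      rw [if_neg hp, h1, h2]
      push_cast
      ring
    · -- k = 2a+1, k+1 even
      subst ha
      have hp : (2 * a + 1 + 1) % 2 = 0 := by omega
      have h1 : (2 * a + 1 + 1) / 2 = a + 1 := by omega
      have h2 : (2 * a + 1 + 1 + 1) / 2 = a + 1 := by omega
      rw [if_pos hp, h1, h2]
      simp

lemma B_eq (m : Nat) : ft_v4_alt (m : Int) = odS m + evS m := by
  unfold ft_v4_alt
  have hmax : max (m : Int) 0 = (m : Int) := by omega
  have hfd : PySem.Int.floordiv ((m : Int) + 1) 2 = (((m + 1) / 2 : Nat) : Int) := by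
    rw [PySem.Int.floordiv_eq_ediv_of_pos (by norm_num : (0:Int) < 2)]
    push_cast [Int.natCast_div]
    norm_num
  simp only [hmax, hfd]
  rw [B_fold m, od_closed m]

-- ===== VERDICT (by name: the statement is the Claim_ definition above) =====
theorem ft_v4_spec : Claim_equal_ft_v4 := by
  intro n _
  unfold Spec_ft_v4
  by_cases hn : 0 ≤ n
  · obtain ⟨m, rfl⟩ : ∃ m : Nat, n = (m : Int) := ⟨n.toNat, by omega⟩
    rw [A_eq m, B_eq m]
  · have hnil : PySem.List.pyRange 1 (n + 1) 1 = [] :=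
      PySem.List.pyRange_one_eq_nil (by omega)
    have hmax : max n 0 = 0 := by omega
    unfold ft_v4 ft_v4_alt
    simp [hnil, hmax]
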